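-- pv_equiv track=rewrite | github.com/WachirananNot/229223-Programming-For-Data-Science | Quiz2/Quiz2_2_630510642.py | pair_request
-- ===== SOURCE A (Python) =====
-- def pair_request(list_input,sum):
--     sum1 = []
--     for i in range (len(list_input)):
--         sum2 = []
--         for j in range (i,len(list_input)):
--             if list_input[i] != list_input[j]:
--                 if list_input[i] + list_input[j] == sum:
--                     sum2.append(list_input[i])
--                     sum2.append(list_input[j])
--                 else:
--                     continue
--             else:
--                 continue
--         if len(sum2)!=0:
--             sum1.append(sum2)
--
--     return(sum1)
-- ===== SOURCE B (Python) =====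
-- def pair_request(list_input, sum):
--     # One pass: keep counts of values in the remaining suffix; for each v,
--     # the complement c = sum - v appears k times after it, giving [v, c] * k.
--     counts = {}
--     for v in list_input:
--         counts[v] = counts.get(v, 0) + 1
--     result = []
--     for v in list_input:
--         counts[v] -= 1
--         c = sum - v
--         k = counts.get(c, 0)
--         if c != v and k > 0:
--             result.append([v, c] * k)
--     return result
-- ===== Notes on version B (the rewrite author's own statement) =====
-- stated objective: faster
-- what changed: Replaces A's nested index loops (for each i, rescanning the whole suffix for matching complements) by a single pass that first builds a value-count dictionary and then, per element, decrements its count and emits the block [v, sum-v] repeated by the suffix count of the complement.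
import Mathlib
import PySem

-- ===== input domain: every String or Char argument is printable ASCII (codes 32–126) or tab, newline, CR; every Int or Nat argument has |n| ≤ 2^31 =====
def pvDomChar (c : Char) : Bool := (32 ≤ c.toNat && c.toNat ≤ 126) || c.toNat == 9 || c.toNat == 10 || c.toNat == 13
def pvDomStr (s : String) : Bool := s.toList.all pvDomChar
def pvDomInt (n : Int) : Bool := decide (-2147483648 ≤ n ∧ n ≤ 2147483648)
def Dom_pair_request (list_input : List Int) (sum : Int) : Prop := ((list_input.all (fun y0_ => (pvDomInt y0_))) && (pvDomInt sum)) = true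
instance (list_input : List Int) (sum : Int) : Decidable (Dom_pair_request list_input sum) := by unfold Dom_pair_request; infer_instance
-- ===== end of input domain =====

-- B replaces A's quadratic index-pair scan by a single pass over the list with a
-- suffix-count dictionary (objective: faster); the return value is identical.

-- ===== PORT A =====
def pair_request (list_input : List Int) (sum : Int) : List (List Int) :=
  -- for i in range(len(list_input)); loop indices are in range, so pyGetD is exact here
  (PySem.List.pyRange 0 (list_input.length : Int) 1).foldl (fun sum1 i =>
    let sum2 := (PySem.List.pyRange i (list_input.length : Int) 1).foldl (fun sum2 j =>
      if PySem.List.pyGetD list_input i 0 ≠ PySem.List.pyGetD list_input j 0 then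
        if PySem.List.pyGetD list_input i 0 + PySem.List.pyGetD list_input j 0 = sum then
          (sum2 ++ [PySem.List.pyGetD list_input i 0]) ++ [PySem.List.pyGetD list_input j 0]
        else sum2
      else sum2) []
    if sum2.length ≠ 0 then sum1 ++ [sum2] else sum1) []

-- ===== PORT B =====
def pair_request_alt (list_input : List Int) (sum : Int) : List (List Int) :=
  -- counts = {}; for v in list_input: counts[v] = counts.get(v, 0) + 1
  let counts := list_input.foldl (fun d v => d.insert v (d.getD v 0 + 1)) PySem.Dict.empty
  -- for v in list_input: counts[v] -= 1; …  (v is always a present key, so modify with default 0 is exact)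
  (list_input.foldl (fun (st : PySem.Dict Int Int × List (List Int)) v =>
      let counts := st.1.modify v 0 (· - 1)
      let c := sum - v
      let k := counts.getD c 0
      if c ≠ v ∧ 0 < k then
        -- [v, c] * k  (k ≥ 0 here), ported as flattened replication
        (counts, st.2 ++ [(List.replicate k.toNat [v, c]).flatten])
      else (counts, st.2)) (counts, ([] : List (List Int)))).2

-- ===== PRECONDITION & SPEC =====
def Spec_pair_request (list_input : List Int) (sum : Int) (out : List (List Int)) : Prop := out = pair_request_alt list_input sum
instance (list_input : List Int) (sum : Int) (out : List (List Int)) : Decidable (Spec_pair_request list_input sum out) := by unfold Spec_pair_request; infer_instance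

-- ===== CLAIM (what is proved, stated in full; the proofs are below) =====
def Claim_equal_pair_request : Prop := ∀ (list_input : List Int) (sum : Int), Dom_pair_request list_input sum → Spec_pair_request list_input sum (pair_request list_input sum)

-- ===== LEMMAS AND PROOFS =====

-- the common value of both programs: one block [v, c] * k per earlier element v whose
-- complement c = sum - v is distinct from v and occurs k > 0 times later
def pvCommon (sum : Int) : List Int → List (List Int)
  | [] => []
  | v :: rest =>
    let c := sum - v
    let k := rest.count c
    if c ≠ v ∧ 0 < k then (List.replicate k [v, c]).flatten :: pvCommon sum rest
    else pvCommon sum rest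

lemma pv_inner_char (sum v : Int) (l : List Int) (acc : List Int) :
    l.foldl (fun s x => if v ≠ x then if v + x = sum then (s ++ [v]) ++ [x] else s else s) acc
      = acc ++ (if sum - v ≠ v then (List.replicate (l.count (sum - v)) [v, sum - v]).flatten else []) := by
  induction l generalizing acc with
  | nil => simp
  | cons x t ih =>
    rw [List.foldl_cons, ih]
    split_ifs with h1 h2 h3 h3 h3
    · have hx : x = sum - v := by omega
      subst hx
      simp [List.replicate_succ]
    · exfalso; omega
    · have hx : ¬ (x = sum - v) := by omega
      simp [hx]
    · rfl
    · have hx : ¬ (x = sum - v) := by omega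
      simp [hx]
    · rfl

lemma pv_outer_char (xs : List Int) (sum : Int) :
    ∀ (m : Nat) (a : Int), 0 ≤ a → ((xs.length : Int) - a).toNat = m →
      ∀ acc : List (List Int),
      (PySem.List.pyRange a (xs.length : Int) 1).foldl (fun sum1 i =>
        let sum2 := (PySem.List.pyRange i (xs.length : Int) 1).foldl (fun sum2 j =>
          if PySem.List.pyGetD xs i 0 ≠ PySem.List.pyGetD xs j 0 then
            if PySem.List.pyGetD xs i 0 + PySem.List.pyGetD xs j 0 = sum then
              (sum2 ++ [PySem.List.pyGetD xs i 0]) ++ [PySem.List.pyGetD xs j 0]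
            else sum2
          else sum2) []
        if sum2.length ≠ 0 then sum1 ++ [sum2] else sum1) acc
      = acc ++ pvCommon sum (xs.drop a.toNat) := by
  intro m
  induction m with
  | zero =>
    intro a ha hm acc
    have hna : (xs.length : Int) ≤ a := by omega
    have hdrop : xs.drop a.toNat = [] := by
      apply List.drop_eq_nil_of_le; omega
    rw [PySem.List.pyRange_one_eq_nil hna, hdrop]
    simp [pvCommon]
  | succ m ih =>
    intro a ha hm acc
    have han : a < (xs.length : Int) := by omega
    have hlt : a.toNat < xs.length := by omega
    have hv : PySem.List.pyGetD xs a 0 = xs[a.toNat] := PySem.List.pyGetD_eq_getElem xs 0 ha han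
    have hdrop : xs.drop a.toNat = xs[a.toNat] :: xs.drop (a.toNat + 1) :=
      List.drop_eq_getElem_cons hlt
    set v := xs[a.toNat] with hvdef
    set t := xs.drop (a.toNat + 1) with htdef
    have hinner : (PySem.List.pyRange a (xs.length : Int) 1).foldl (fun sum2 j =>
          if PySem.List.pyGetD xs a 0 ≠ PySem.List.pyGetD xs j 0 then
            if PySem.List.pyGetD xs a 0 + PySem.List.pyGetD xs j 0 = sum then
              (sum2 ++ [PySem.List.pyGetD xs a 0]) ++ [PySem.List.pyGetD xs j 0]
            else sum2
          else sum2) []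
        = (if sum - v ≠ v then (List.replicate (t.count (sum - v)) [v, sum - v]).flatten else []) := by
      rw [PySem.List.foldl_pyRange_pyGetD' xs 0
        (fun s x => if PySem.List.pyGetD xs a 0 ≠ x then
            if PySem.List.pyGetD xs a 0 + x = sum then (s ++ [PySem.List.pyGetD xs a 0]) ++ [x] else s
          else s) [] ha]
      rw [pv_inner_char, hv, hdrop]
      by_cases hcv : sum - v ≠ v
      · have hcnt : (v :: t).count (sum - v) = t.count (sum - v) := by
          rw [List.count_cons]
          simp
          omega
        simp only [hcnt, List.nil_append]
      · simp [hcv]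
    have hlet : ∀ (w : List Int) (acc : List (List Int)),
        (let sum2 := w; if sum2.length ≠ 0 then acc ++ [sum2] else acc)
          = if w.length ≠ 0 then acc ++ [w] else acc := fun _ _ => rfl
    rw [PySem.List.pyRange_one_cons han, List.foldl_cons, hinner, hlet]
    have hih := ih (a + 1) (by omega) (by omega)
    have htn : (a + 1).toNat = a.toNat + 1 := by omega
    rw [htn] at hih
    rw [← htdef] at hih
    by_cases hcv : sum - v ≠ v
    · rw [if_pos hcv]
      by_cases hk : 0 < t.count (sum - v)
      · have hlen : ((List.replicate (t.count (sum - v)) [v, sum - v]).flatten).length ≠ 0 := by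
          simp
          omega
        rw [if_pos hlen, hih, hdrop]
        have hcomm : pvCommon sum (v :: t) =
            (List.replicate (t.count (sum - v)) [v, sum - v]).flatten :: pvCommon sum t := by
          simp [pvCommon, hcv, hk]
        rw [hcomm]; simp
      · have hc0 : t.count (sum - v) = 0 := by omega
        have hlen : ¬ (((List.replicate (t.count (sum - v)) [v, sum - v]).flatten).length ≠ 0) := by
          simp [hc0]
        rw [if_neg hlen, hih, hdrop]
        have hcomm : pvCommon sum (v :: t) = pvCommon sum t := by
          simp [pvCommon, hc0]
        rw [hcomm]
    · rw [if_neg hcv]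
      have hlen : ¬ ((([] : List Int)).length ≠ 0) := by simp
      rw [if_neg hlen, hih, hdrop]
      have hcomm : pvCommon sum (v :: t) = pvCommon sum t := by
        simp only [pvCommon]
        have hnc : ¬ (sum - v ≠ v ∧ 0 < t.count (sum - v)) := by
          intro h; exact hcv h.1
        rw [if_neg hnc]
      rw [hcomm]

lemma pv_b_loop (sum : Int) :
    ∀ (l : List Int) (d : PySem.Dict Int Int) (acc : List (List Int)),
      (∀ x, d.getD x 0 = (l.count x : Int)) →
      (l.foldl (fun (st : PySem.Dict Int Int × List (List Int)) v =>
          let counts := st.1.modify v 0 (· - 1)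
          let c := sum - v
          let k := counts.getD c 0
          if c ≠ v ∧ 0 < k then
            (counts, st.2 ++ [(List.replicate k.toNat [v, c]).flatten])
          else (counts, st.2)) (d, acc)).2
      = acc ++ pvCommon sum l := by
  intro l
  induction l with
  | nil => intro d acc _; simp [pvCommon]
  | cons v t ih =>
    intro d acc hd
    have hd' : ∀ x, (d.modify v 0 (· - 1)).getD x 0 = (t.count x : Int) := by
      intro x
      rw [PySem.Dict.getD_modify]
      by_cases hx : x = v
      · rw [if_pos hx, hd, hx]
        have hcnt : (v :: t).count v = t.count v + 1 := by simp
        rw [hcnt]; push_cast; ring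
      · rw [if_neg hx, hd]
        have hvx : ¬ (v = x) := fun h => hx h.symm
        have hcnt : (v :: t).count x = t.count x := by
          rw [List.count_cons]; simp [hvx]
        rw [hcnt]
    have hk : (d.modify v 0 (· - 1)).getD (sum - v) 0 = (t.count (sum - v) : Int) :=
      hd' (sum - v)
    simp only [List.foldl_cons]
    by_cases hc : sum - v ≠ v ∧ 0 < ((d.modify v 0 (· - 1)).getD (sum - v) 0)
    · rw [if_pos hc, ih _ _ hd']
      have hkpos : 0 < t.count (sum - v) := by
        have h2 := hc.2; rw [hk] at h2; exact_mod_cast h2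
      have hcomm : pvCommon sum (v :: t) =
          (List.replicate (t.count (sum - v)) [v, sum - v]).flatten :: pvCommon sum t := by
        simp [pvCommon, hc.1, hkpos]
      rw [hcomm, hk]
      simp
    · rw [if_neg hc, ih _ _ hd']
      have hcomm : pvCommon sum (v :: t) = pvCommon sum t := by
        by_cases hcv : sum - v = v
        · simp [pvCommon, hcv]
        · have hnk : ¬ 0 < t.count (sum - v) := by
            intro hpos
            exact hc ⟨hcv, by rw [hk]; exact_mod_cast hpos⟩
          simp [pvCommon, hnk]
      rw [hcomm]

lemma pv_a_eq (xs : List Int) (sum : Int) : pair_request xs sum = pvCommon sum xs := by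
  unfold pair_request
  have h := pv_outer_char xs sum ((xs.length : Int) - 0).toNat 0 (by omega) rfl []
  simpa using h

lemma pv_b_eq (xs : List Int) (sum : Int) : pair_request_alt xs sum = pvCommon sum xs := by
  unfold pair_request_alt
  rw [pv_b_loop sum xs _ [] ?_]
  · simp
  · intro x
    rw [PySem.Dict.foldl_insert_getD_add_one_eq_counter, PySem.Dict.getD_counter]

-- ===== VERDICT (by name: the statement is the Claim_ definition above) =====
theorem pair_request_spec : Claim_equal_pair_request := by
  intro xs s _
  unfold Spec_pair_request
  rw [pv_a_eq, pv_b_eq]
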